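-- pv_equiv track=rewrite | github.com/moonwg09/coding-test | 프로그래머스/lv1/12947. 하샤드 수/하샤드 수.py | solution
-- ===== SOURCE A (Python) =====
-- def solution(x):
--     sum = 0
--     answer = str(x)
--     for n in answer:
--         sum += int(n)
--     if x % sum == 0:
--         return True
--     else:
--         return False
-- ===== SOURCE B (Python) =====
-- def solution(x):
--     n = x
--     s = 0
--     while n > 0:
--         s += n % 10
--         n //= 10
--     return x % s == 0
-- ===== Notes on version B (the rewrite author's own statement) =====
-- stated objective: idiomatic
-- what changed: Digit sum computed arithmetically with a divmod while-loop over the integer instead of iterating over the characters of str(x).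
import Mathlib
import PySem

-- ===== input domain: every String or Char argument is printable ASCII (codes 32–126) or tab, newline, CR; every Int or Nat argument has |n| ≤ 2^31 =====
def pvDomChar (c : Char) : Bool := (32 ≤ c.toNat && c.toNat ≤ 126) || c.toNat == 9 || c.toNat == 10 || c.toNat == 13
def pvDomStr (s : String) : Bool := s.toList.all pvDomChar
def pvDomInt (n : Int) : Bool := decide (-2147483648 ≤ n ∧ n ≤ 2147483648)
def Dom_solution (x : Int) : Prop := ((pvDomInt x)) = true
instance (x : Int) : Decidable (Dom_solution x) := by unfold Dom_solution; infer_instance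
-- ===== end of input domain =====

-- B computes the digit sum arithmetically (divmod while-loop) instead of iterating over str(x); same divisibility test.

-- ===== PORT A =====
-- sum += int(n): int(c) raises only on '-' (negative x), which Pre_solution excludes; the .getD 0 is unreachable inside Pre_.
def solution (x : Int) : Bool :=
  let sum := (PySem.Int.toStr x).toList.foldl
    (fun s c => s + ((PySem.Int.ofStr? (String.ofList [c])).getD 0)) 0
  if PySem.Int.mod x sum == 0 then true else false

-- ===== PORT B =====
-- while n > 0: s += n % 10; n //= 10
def solAltLoop (n s : Int) : Int :=
  if 0 < n then solAltLoop (PySem.Int.floordiv n 10) (s + PySem.Int.mod n 10) else s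
termination_by n.toNat
decreasing_by
  have h1 : PySem.Int.floordiv n 10 = n / 10 := by
    simp [PySem.Int.floordiv, Int.fdiv_eq_ediv_of_nonneg _ (by norm_num : (0:Int) ≤ 10)]
  omega

def solution_alt (x : Int) : Bool :=
  PySem.Int.mod x (solAltLoop x 0) == 0

-- ===== PRECONDITION & SPEC =====
-- Pre_ excludes exactly the inputs where A raises: ValueError (int('-')) for x < 0, ZeroDivisionError for x = 0.
def Pre_solution (x : Int) : Prop := 1 ≤ x
instance (x : Int) : Decidable (Pre_solution x) := by unfold Pre_solution; infer_instance
def pvWitness_solution : Int := (18)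
def Spec_solution (x : Int) (out : Bool) : Prop := out = solution_alt x
instance (x : Int) (out : Bool) : Decidable (Spec_solution x out) := by unfold Spec_solution; infer_instance

-- ===== CLAIM (what is proved, stated in full; the proofs are below) =====
def Claim_equal_solution : Prop := ∀ (x : Int), Dom_solution x → Pre_solution x → Spec_solution x (solution x)

-- ===== LEMMAS AND PROOFS =====

-- value of int(c) for a decimal digit char
lemma charval (d : Nat) (h : d < 10) :
    ((PySem.Int.ofStr? (String.ofList [Nat.digitChar d])).getD 0) = (d : Int) := by
  interval_cases d <;> decide

-- the fold of A over a list of digit chars is the (casted) sum of the digits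
lemma foldl_digitChars (l : List Nat) (s : Int) (h : ∀ d ∈ l, d < 10) :
    (l.map Nat.digitChar).foldl
      (fun s c => s + ((PySem.Int.ofStr? (String.ofList [c])).getD 0)) s
      = s + (l.sum : Int) := by
  induction l generalizing s with
  | nil => simp
  | cons a t ih =>
    simp only [List.map_cons, List.foldl_cons, List.sum_cons]
    rw [charval a (h a (by simp)), ih _ (fun d hd => h d (by simp [hd]))]
    push_cast; ring

-- Nat.toDigits via Nat.digits (for n ≠ 0, with enough fuel)
lemma toDigitsCore_eq (f : Nat) : ∀ (n : Nat) (acc : List Char), n ≠ 0 → n < 10 ^ f →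
    Nat.toDigitsCore 10 (f + 1) n acc
      = ((Nat.digits 10 n).map Nat.digitChar).reverse ++ acc := by
  induction f with
  | zero => intro n acc hn hlt; omega
  | succ f ih =>
    intro n acc hn hlt
    rw [Nat.toDigitsCore]
    by_cases h0 : n / 10 = 0
    · simp only [h0, if_true]
      rw [Nat.digits_def' (by norm_num : 1 < 10) (by omega), h0]
      simp
    · simp only [if_neg h0]
      rw [ih (n / 10) _ h0 (by
        have : n < 10 ^ f * 10 := by rw [← pow_succ]; exact hlt
        omega)]
      conv_rhs => rw [Nat.digits_def' (by norm_num : 1 < 10) (by omega : 0 < n)]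
      simp

lemma toDigits_eq (n : Nat) (hn : n ≠ 0) :
    Nat.toDigits 10 n = ((Nat.digits 10 n).map Nat.digitChar).reverse := by
  have h : Nat.toDigits 10 n = Nat.toDigitsCore 10 (n + 1) n [] := rfl
  rw [h, toDigitsCore_eq n n [] hn (Nat.lt_pow_self (by norm_num)), List.append_nil]

-- A's digit sum, for positive x, is the base-10 digit sum of x
lemma sumA_eq (x : Int) (hx : 1 ≤ x) :
    (PySem.Int.toStr x).toList.foldl
      (fun s c => s + ((PySem.Int.ofStr? (String.ofList [c])).getD 0)) 0
      = ((Nat.digits 10 x.toNat).sum : Int) := by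
  rw [PySem.Int.toList_toStr]
  have h1 : PySem.Int.toChars x = Nat.toDigits 10 x.toNat := by
    simp [PySem.Int.toChars, if_neg (by omega : ¬ x < 0)]
  rw [h1, toDigits_eq x.toNat (by omega), ← List.map_reverse,
    foldl_digitChars _ _ (fun d hd => Nat.digits_lt_base (by norm_num) (by simpa using hd))]
  simp

-- B's loop computes the same digit sum
lemma solAltLoop_eq (m : Nat) : ∀ (n : Int), n.toNat = m → 0 ≤ n → ∀ (s : Int),
    solAltLoop n s = s + ((Nat.digits 10 n.toNat).sum : Int) := by
  induction m using Nat.strong_induction_on with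
  | _ m ih =>
    intro n hm hn s
    rw [solAltLoop]
    by_cases h : 0 < n
    · rw [if_pos h]
      have hfd : PySem.Int.floordiv n 10 = n / 10 := by
        simp [PySem.Int.floordiv, Int.fdiv_eq_ediv_of_nonneg _ (by norm_num : (0:Int) ≤ 10)]
      rw [hfd, ih (n / 10).toNat (by omega) (n / 10) rfl (by omega)]
      have hmod : PySem.Int.mod n 10 = ((n.toNat % 10 : Nat) : Int) := by
        have h2 : PySem.Int.mod n 10 = n % 10 := by
          simp [PySem.Int.mod, Int.fmod_eq_emod]
        rw [h2]; omega
      have hdiv : (n / 10).toNat = n.toNat / 10 := by omega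
      rw [hmod, hdiv, Nat.digits_def' (by norm_num : 1 < 10) (by omega : 0 < n.toNat)]
      simp only [List.sum_cons]
      push_cast; ring
    · rw [if_neg h]
      have h0 : n.toNat = 0 := by omega
      rw [h0]
      simp

-- ===== VERDICT (by name: the statement is the Claim_ definition above) =====
theorem solution_spec : Claim_equal_solution := by
  intro x _ hx
  unfold Pre_solution at hx
  unfold Spec_solution solution solution_alt
  rw [sumA_eq x hx, solAltLoop_eq x.toNat x rfl (by omega) 0, zero_add]
  simp [BEq.beq]
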